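-- pv_equiv track=rewrite | github.com/kevin851066/Leetcode | Python/905.py | sortArrayByParity_sol1
-- ===== SOURCE A (Python) =====
-- def sortArrayByParity_sol1(A):
--     '''
--     :type: A: List[int]
--     :rtype: List[int]
--     '''
--     even_arr, odd_arr = [], []
--     for i in A:
--         if i % 2 == 0:
--             even_arr.append(i)
--         else:
--             odd_arr.append(i)
--     return even_arr + odd_arr
-- ===== SOURCE B (Python) =====
-- def sortArrayByParity_sol1(A):
--     return sorted(A, key=lambda x: x % 2)
-- ===== Notes on version B (the rewrite author's own statement) =====
-- stated objective: idiomatic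
-- what changed: Replaced the manual two-bucket partition loop with a single stable sort keyed by parity (x % 2), which reproduces evens-then-odds with original relative order by Timsort stability.
import Mathlib
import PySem

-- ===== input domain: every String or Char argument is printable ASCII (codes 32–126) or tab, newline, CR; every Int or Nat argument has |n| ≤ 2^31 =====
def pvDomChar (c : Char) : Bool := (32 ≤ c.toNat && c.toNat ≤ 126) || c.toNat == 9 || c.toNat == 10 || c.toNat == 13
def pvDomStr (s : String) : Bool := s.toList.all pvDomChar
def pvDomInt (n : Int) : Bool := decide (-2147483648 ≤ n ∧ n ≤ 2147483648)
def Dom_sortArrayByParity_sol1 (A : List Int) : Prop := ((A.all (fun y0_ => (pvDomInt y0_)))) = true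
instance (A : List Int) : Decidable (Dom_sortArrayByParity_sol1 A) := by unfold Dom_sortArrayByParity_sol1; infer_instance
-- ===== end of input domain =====

-- B replaces A's manual two-bucket partition loop with one stable sort keyed by parity (idiomatic).


-- ===== PORT A =====
-- even_arr, odd_arr accumulated in a fold; append i via ++ [i]; result even_arr ++ odd_arr
def sortArrayByParity_sol1 (A : List Int) : List Int :=
  let p := A.foldl
    (fun (acc : List Int × List Int) i =>
      if PySem.Int.mod i 2 = 0 then (acc.1 ++ [i], acc.2) else (acc.1, acc.2 ++ [i]))
    ([], [])
  p.1 ++ p.2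

-- ===== PORT B =====
-- sorted(A, key=lambda x: x % 2)
def sortArrayByParity_sol1_alt (A : List Int) : List Int :=
  PySem.List.sorted A (fun x => PySem.Int.mod x 2) false

-- ===== PRECONDITION & SPEC =====
def Spec_sortArrayByParity_sol1 (A : List Int) (out : List Int) : Prop := out = sortArrayByParity_sol1_alt A
instance (A : List Int) (out : List Int) : Decidable (Spec_sortArrayByParity_sol1 A out) := by unfold Spec_sortArrayByParity_sol1; infer_instance

-- ===== CLAIM (what is proved, stated in full; the proofs are below) =====
def Claim_equal_sortArrayByParity_sol1 : Prop := ∀ (A : List Int), Dom_sortArrayByParity_sol1 A → Spec_sortArrayByParity_sol1 A (sortArrayByParity_sol1 A)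

-- ===== LEMMAS AND PROOFS =====

-- insertBy puts x right between e and o when x compares false against all of e and true against o's head
theorem insertBy_between (before : Int → Int → Bool) (x : Int) (e o : List Int)
    (he : ∀ y ∈ e, before x y = false)
    (ho : ∀ h t, o = h :: t → before x h = true) :
    PySem.List.insertBy before x (e ++ o) = e ++ x :: o := by
  induction e with
  | nil =>
    cases o with
    | nil => simp [PySem.List.insertBy]
    | cons h t => simp [PySem.List.insertBy, ho h t rfl]
  | cons a e' ih =>
    have ha : before x a = false := he a (by simp)
    simp [PySem.List.insertBy, ha]
    exact ih (fun y hy => he y (by simp [hy]))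

-- the insertion-sort fold keeps the list partitioned exactly as A's two buckets
theorem loop_eq (A : List Int) : ∀ e o : List Int,
    (∀ y ∈ e, PySem.Int.mod y 2 = 0) → (∀ y ∈ o, PySem.Int.mod y 2 = 1) →
    A.foldl (fun acc x =>
        PySem.List.insertBy (fun a b => decide (PySem.Int.mod a 2 < PySem.Int.mod b 2)) x acc)
      (e ++ o)
    = (A.foldl
        (fun (acc : List Int × List Int) i =>
          if PySem.Int.mod i 2 = 0 then (acc.1 ++ [i], acc.2) else (acc.1, acc.2 ++ [i]))
        (e, o)).1 ++
      (A.foldl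
        (fun (acc : List Int × List Int) i =>
          if PySem.Int.mod i 2 = 0 then (acc.1 ++ [i], acc.2) else (acc.1, acc.2 ++ [i]))
        (e, o)).2 := by
  induction A with
  | nil => intro e o _ _; simp
  | cons x A ih =>
    intro e o he ho
    have hx : PySem.Int.mod x 2 = 0 ∨ PySem.Int.mod x 2 = 1 := by
      have h1 := PySem.Int.mod_nonneg x (b := 2) (by norm_num)
      have h2 := PySem.Int.mod_lt x (b := 2) (by norm_num)
      omega
    have hm : ∀ z : Int, PySem.Int.mod z 2 = z % 2 :=
      fun z => PySem.Int.mod_eq_emod_of_pos (a := z) (b := 2) (by norm_num)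
    rcases hx with hx | hx
    · have hins : PySem.List.insertBy
          (fun a b => decide (PySem.Int.mod a 2 < PySem.Int.mod b 2)) x (e ++ o)
          = (e ++ [x]) ++ o := by
        rw [insertBy_between _ _ e o
          (fun y hy => by have h1 := he y hy; simp only [hm] at h1 hx ⊢; simp; omega)
          (fun h t ht => by have h1 := ho h (by simp [ht]); simp only [hm] at h1 hx ⊢; simp; omega)]
        simp
      simp only [List.foldl_cons, hx, hins]
      exact ih (e ++ [x]) o
        (fun y hy => by rcases List.mem_append.mp hy with h | h
                        · exact he y h
                        · simp at h; simpa [h] using hx) ho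
    · have hx0 : ¬ PySem.Int.mod x 2 = 0 := by omega
      have hins : PySem.List.insertBy
          (fun a b => decide (PySem.Int.mod a 2 < PySem.Int.mod b 2)) x (e ++ o)
          = e ++ (o ++ [x]) := by
        rw [← List.append_assoc]
        have := insertBy_between
          (fun a b => decide (PySem.Int.mod a 2 < PySem.Int.mod b 2)) x (e ++ o) []
          (fun y hy => by
            rcases List.mem_append.mp hy with h | h
            · have h1 := he y h; simp only [hm] at h1 hx ⊢; simp; omega
            · have h1 := ho y h; simp only [hm] at h1 hx ⊢; simp; omega)
          (fun h t ht => by simp at ht)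
        simpa using this
      simp only [List.foldl_cons, hx0, hins]
      exact ih e (o ++ [x]) he
        (fun y hy => by rcases List.mem_append.mp hy with h | h
                        · exact ho y h
                        · simp at h; simpa [h] using hx)

-- ===== VERDICT (by name: the statement is the Claim_ definition above) =====
theorem sortArrayByParity_sol1_spec : Claim_equal_sortArrayByParity_sol1 := by
  intro A _
  unfold Spec_sortArrayByParity_sol1 sortArrayByParity_sol1 sortArrayByParity_sol1_alt
  simp only [PySem.List.sorted]
  have := loop_eq A [] [] (by simp) (by simp)
  simp only [List.nil_append] at this
  exact this.symm
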